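-- pv_equiv track=rewrite | github.com/Jjschwartz/NetworkAttackSimulator | cyber_attack_simulator/envs/pomdp_generator.py | generate_network_states
-- ===== SOURCE A (Python) =====
-- def generate_network_states(address_space, machine_states):
--     """
--     Recursively generate all possible network states from set of possible machine states for each
--     machine on the network
--
--     Network state = [((0,0), (compromised, [s0, ..., sn])), ... ]
--     """
--     network_states = []
--     m = address_space[0]
--     if len(address_space) == 1:
--         for s in machine_states:
--             network_states.append([(m, s)])
--         return network_states
--
--     for subState in generate_network_states(address_space[1:], machine_states):
--         for s in machine_states:
--             network_states.append([(m, s)] + subState)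
--     return network_states
-- ===== SOURCE B (Python) =====
-- def generate_network_states(address_space, machine_states):
--     """Iteratively build the Cartesian product of machine states over the
--     address space: fold from the last address to the first over a [[]] seed,
--     so the first machine's state varies fastest (same order as A)."""
--     states = [[]]
--     for addr in reversed(address_space):
--         states = [[(addr, s)] + st for st in states for s in machine_states]
--     return states
-- ===== Notes on version B (the rewrite author's own statement) =====
-- stated objective: simpler
-- what changed: Replaced the recursion with its special len==1 base case by a single iterative fold over the reversed address space that rebuilds the state list via one comprehension from a [[]] seed.
import Mathlib
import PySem

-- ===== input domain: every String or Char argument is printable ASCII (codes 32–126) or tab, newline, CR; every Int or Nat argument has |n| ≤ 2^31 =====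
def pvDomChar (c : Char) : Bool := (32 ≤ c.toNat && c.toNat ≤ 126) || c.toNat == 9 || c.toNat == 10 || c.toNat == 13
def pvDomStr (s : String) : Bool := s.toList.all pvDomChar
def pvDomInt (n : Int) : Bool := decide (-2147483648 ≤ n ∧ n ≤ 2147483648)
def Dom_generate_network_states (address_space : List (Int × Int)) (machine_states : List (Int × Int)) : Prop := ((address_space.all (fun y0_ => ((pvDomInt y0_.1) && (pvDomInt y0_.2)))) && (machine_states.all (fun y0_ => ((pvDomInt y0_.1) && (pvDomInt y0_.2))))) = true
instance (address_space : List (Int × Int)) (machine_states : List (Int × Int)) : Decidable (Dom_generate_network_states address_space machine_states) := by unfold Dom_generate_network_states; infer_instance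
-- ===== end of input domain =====

-- B replaces A's recursion by a single iterative fold over the reversed address space
-- (equivalence is about the return value; neither program mutates its arguments).

-- ===== PORT A =====
-- A: recursive; m = address_space[0] (raises IndexError on [] — excluded by Pre_);
-- base case len == 1 appends [(m, s)] per s; otherwise prepends (m, s) to each recursive subState.
def generate_network_states (address_space : List (Int × Int)) (machine_states : List (Int × Int)) : List (List ((Int × Int) × (Int × Int))) :=
  match address_space with
  | [] => []  -- Python raises IndexError here; outside Pre_
  | m :: rest =>
    if rest = [] then
      machine_states.foldl (fun acc s => acc ++ [[(m, s)]]) []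
    else
      (generate_network_states rest machine_states).foldl
        (fun acc subState =>
          machine_states.foldl (fun acc2 s => acc2 ++ [(m, s) :: subState]) acc) []

-- ===== PORT B =====
-- B: fold from the last address to the first over the seed [[]], rebuilding the
-- state list with one comprehension (outer: existing states, inner: machine states).
def generate_network_states_alt (address_space : List (Int × Int)) (machine_states : List (Int × Int)) : List (List ((Int × Int) × (Int × Int))) :=
  address_space.reverse.foldl
    (fun states addr => states.flatMap (fun st => machine_states.map (fun s => (addr, s) :: st)))
    [[]]

-- ===== PRECONDITION & SPEC =====
-- A raises IndexError on an empty address_space (address_space[0]); that is the only input excluded (B would return [[]] there).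
def Pre_generate_network_states (address_space : List (Int × Int)) (_machine_states : List (Int × Int)) : Prop := address_space ≠ []
instance (address_space : List (Int × Int)) (machine_states : List (Int × Int)) : Decidable (Pre_generate_network_states address_space machine_states) := by unfold Pre_generate_network_states; infer_instance
def pvWitness_generate_network_states : (List (Int × Int)) × (List (Int × Int)) := ([(0, 0), (1, 0)], [(0, 1), (1, 2)])

def Spec_generate_network_states (address_space : List (Int × Int)) (machine_states : List (Int × Int)) (out : List (List ((Int × Int) × (Int × Int)))) : Prop := out = generate_network_states_alt address_space machine_states
instance (address_space : List (Int × Int)) (machine_states : List (Int × Int)) (out : List (List ((Int × Int) × (Int × Int)))) : Decidable (Spec_generate_network_states address_space machine_states out) := by unfold Spec_generate_network_states; infer_instance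

-- ===== CLAIM (what is proved, stated in full; the proofs are below) =====
def Claim_equal_generate_network_states : Prop := ∀ (address_space : List (Int × Int)) (machine_states : List (Int × Int)), Dom_generate_network_states address_space machine_states → Pre_generate_network_states address_space machine_states → Spec_generate_network_states address_space machine_states (generate_network_states address_space machine_states)

-- ===== LEMMAS AND PROOFS =====

-- A's double loop is one flatMap: each recursive subState contributes one block of prepended states.
lemma genA_cons_cons (m : Int × Int) (rest : List (Int × Int)) (hrest : rest ≠ [])
    (ms : List (Int × Int)) :
    generate_network_states (m :: rest) ms
      = (generate_network_states rest ms).flatMap (fun st => ms.map (fun s => (m, s) :: st)) := by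
  simp only [generate_network_states, if_neg hrest]
  have hcong : ∀ (l : List (List ((Int × Int) × (Int × Int)))) (acc),
      l.foldl (fun acc subState => ms.foldl (fun acc2 s => acc2 ++ [(m, s) :: subState]) acc) acc
        = l.foldl (fun acc subState => acc ++ ms.map (fun s => (m, s) :: subState)) acc := by
    intro l
    induction l with
    | nil => intro acc; rfl
    | cons hd tl _ =>
      intro acc
      simp only [List.foldl_cons, PySem.List.foldl_append_singleton_eq_map]
  rw [hcong]
  simpa using PySem.List.foldl_append_eq_flatMap (fun st => ms.map (fun s => (m, s) :: st))
    (l := generate_network_states rest ms) (acc := [])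

-- B on m :: rest is one comprehension step applied to B on rest.
lemma genB_cons (m : Int × Int) (rest ms : List (Int × Int)) :
    generate_network_states_alt (m :: rest) ms
      = (generate_network_states_alt rest ms).flatMap (fun st => ms.map (fun s => (m, s) :: st)) := by
  simp [generate_network_states_alt]

lemma gen_eq (address_space ms : List (Int × Int)) (h : address_space ≠ []) :
    generate_network_states address_space ms = generate_network_states_alt address_space ms := by
  induction address_space with
  | nil => exact absurd rfl h
  | cons m rest ih =>
    cases rest with
    | nil =>
      simp only [generate_network_states,
        PySem.List.foldl_append_singleton_eq_map, List.nil_append]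
      simp [generate_network_states_alt, List.flatMap]
    | cons r rs =>
      rw [genA_cons_cons m (r :: rs) (by simp) ms, genB_cons,
        ih (by simp)]

-- ===== VERDICT (by name: the statement is the Claim_ definition above) =====
theorem generate_network_states_spec : Claim_equal_generate_network_states := by
  intro address_space machine_states _ hpre
  exact gen_eq address_space machine_states hpre
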